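-- pv_equiv track=rewrite | github.com/Phi-lia/hate-speech-reproduction | User_distribution_experiments/Model2_Experiments/auxiliares.py | cv_sorted_data
-- ===== SOURCE A (Python) =====
-- def cv_sorted_data(x_text):
--     train_indexes = []
--     part0,part1,part2,part3,part4,part5,part6,part7,part8,part9 =[],[],[],[],[],[],[],[],[],[]
--     for i in range(len(x_text)):
--         if i >=0 and i <700:
--             part0.append(i)
--         elif i >=700 and i <1400:
--             part1.append(i)
--
--         elif i >=1400 and i <2100:
--             part2.append(i)
--
--         elif i >=2100 and i <2800:
--             part3.append(i)
--
--         elif i >=2800 and i <3494: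
--             part4.append(i)
--
--         elif i >=3494 and i <4198:
--             part5.append(i)
--         elif i >=4198 and i <4897:
--             part6.append(i)
--         elif i >=4897 and i <5599:
--             part7.append(i)
--
--         elif i >=5599 and i <6299:
--             part8.append(i)
--
--         elif i >=6299 and i <7006:
--             part9.append(i)
--     train_indexes.append(part0)
--     train_indexes.append(part1)
--     train_indexes.append(part2)
--     train_indexes.append(part3)
--     train_indexes.append(part4)
--     train_indexes.append(part5)
--     train_indexes.append(part6)
--     train_indexes.append(part7)
--     train_indexes.append(part8)
--     train_indexes.append(part9)
--
--     return train_indexes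
-- ===== SOURCE B (Python) =====
-- def cv_sorted_data(x_text):
--     bounds = [0, 700, 1400, 2100, 2800, 3494, 4198, 4897, 5599, 6299, 7006]
--     n = len(x_text)
--     return [list(range(lo, min(hi, n))) for lo, hi in zip(bounds, bounds[1:])]
-- ===== Notes on version B (the rewrite author's own statement) =====
-- stated objective: simpler
-- what changed: Replaces the per-index scan with its 10-way if/elif dispatch by iterating over a boundary table and emitting each bucket as one contiguous range clamped to min(bound, len(x_text)); indices >= 7006 are dropped by the top bound exactly as A's chain silently drops them.
import Mathlib
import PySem

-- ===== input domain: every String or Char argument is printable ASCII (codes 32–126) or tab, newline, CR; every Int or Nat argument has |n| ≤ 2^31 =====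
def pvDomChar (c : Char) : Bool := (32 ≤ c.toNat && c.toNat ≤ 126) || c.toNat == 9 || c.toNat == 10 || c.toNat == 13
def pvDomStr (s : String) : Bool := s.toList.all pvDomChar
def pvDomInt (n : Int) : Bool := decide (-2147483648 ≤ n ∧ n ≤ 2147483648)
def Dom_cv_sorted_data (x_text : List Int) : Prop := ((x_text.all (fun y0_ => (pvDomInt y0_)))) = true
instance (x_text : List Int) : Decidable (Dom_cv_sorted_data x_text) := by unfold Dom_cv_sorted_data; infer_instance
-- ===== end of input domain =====

-- ===== PORT A =====
-- B replaces the per-index if/elif scan by iterating over a boundary table,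
-- emitting each bucket as one contiguous clamped range (objective: simpler).

-- one iteration of A's loop body: the 10-way if/elif chain on index i
def cvStepA (s : List Int × List Int × List Int × List Int × List Int × List Int × List Int × List Int × List Int × List Int)
    (i : Int) :
    List Int × List Int × List Int × List Int × List Int × List Int × List Int × List Int × List Int × List Int :=
  match s with
  | (p0, p1, p2, p3, p4, p5, p6, p7, p8, p9) =>
  if 0 ≤ i ∧ i < 700 then (p0 ++ [i], p1, p2, p3, p4, p5, p6, p7, p8, p9)
  else if 700 ≤ i ∧ i < 1400 then (p0, p1 ++ [i], p2, p3, p4, p5, p6, p7, p8, p9)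
  else if 1400 ≤ i ∧ i < 2100 then (p0, p1, p2 ++ [i], p3, p4, p5, p6, p7, p8, p9)
  else if 2100 ≤ i ∧ i < 2800 then (p0, p1, p2, p3 ++ [i], p4, p5, p6, p7, p8, p9)
  else if 2800 ≤ i ∧ i < 3494 then (p0, p1, p2, p3, p4 ++ [i], p5, p6, p7, p8, p9)
  else if 3494 ≤ i ∧ i < 4198 then (p0, p1, p2, p3, p4, p5 ++ [i], p6, p7, p8, p9)
  else if 4198 ≤ i ∧ i < 4897 then (p0, p1, p2, p3, p4, p5, p6 ++ [i], p7, p8, p9)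
  else if 4897 ≤ i ∧ i < 5599 then (p0, p1, p2, p3, p4, p5, p6, p7 ++ [i], p8, p9)
  else if 5599 ≤ i ∧ i < 6299 then (p0, p1, p2, p3, p4, p5, p6, p7, p8 ++ [i], p9)
  else if 6299 ≤ i ∧ i < 7006 then (p0, p1, p2, p3, p4, p5, p6, p7, p8, p9 ++ [i])
  else (p0, p1, p2, p3, p4, p5, p6, p7, p8, p9)

def cv_sorted_data (x_text : List Int) : List (List Int) :=
  let (p0, p1, p2, p3, p4, p5, p6, p7, p8, p9) :=
    (PySem.List.pyRange 0 (x_text.length : Int)).foldl cvStepA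
      ([], [], [], [], [], [], [], [], [], [])
  [p0, p1, p2, p3, p4, p5, p6, p7, p8, p9]

-- ===== PORT B =====
def cvBounds : List Int := [0, 700, 1400, 2100, 2800, 3494, 4198, 4897, 5599, 6299, 7006]

def cv_sorted_data_alt (x_text : List Int) : List (List Int) :=
  let n : Int := (x_text.length : Int)
  (cvBounds.zip cvBounds.tail).map (fun p => PySem.List.pyRange p.1 (min p.2 n))

-- ===== PRECONDITION & SPEC =====
def Spec_cv_sorted_data (x_text : List Int) (out : List (List Int)) : Prop := out = cv_sorted_data_alt x_text
instance (x_text : List Int) (out : List (List Int)) : Decidable (Spec_cv_sorted_data x_text out) := by unfold Spec_cv_sorted_data; infer_instance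

-- ===== CLAIM (what is proved, stated in full; the proofs are below) =====
def Claim_equal_cv_sorted_data : Prop := ∀ (x_text : List Int), Dom_cv_sorted_data x_text → Spec_cv_sorted_data x_text (cv_sorted_data x_text)

-- ===== LEMMAS AND PROOFS =====
-- membership test for one bucket [lo, hi)
def cvIn (lo hi : Int) (i : Int) : Bool := decide (lo ≤ i ∧ i < hi)

-- A's loop accumulates, in each bucket, exactly the indices of the scanned list
-- that satisfy that bucket's interval test (the elif conditions are mutually exclusive).
set_option maxHeartbeats 2000000 in
theorem cv_fold_filter (l : List Int) (p0 p1 p2 p3 p4 p5 p6 p7 p8 p9 : List Int) :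
    l.foldl cvStepA (p0, p1, p2, p3, p4, p5, p6, p7, p8, p9) =
      (p0 ++ l.filter (cvIn 0 700), p1 ++ l.filter (cvIn 700 1400),
       p2 ++ l.filter (cvIn 1400 2100), p3 ++ l.filter (cvIn 2100 2800),
       p4 ++ l.filter (cvIn 2800 3494), p5 ++ l.filter (cvIn 3494 4198),
       p6 ++ l.filter (cvIn 4198 4897), p7 ++ l.filter (cvIn 4897 5599),
       p8 ++ l.filter (cvIn 5599 6299), p9 ++ l.filter (cvIn 6299 7006)) := by
  induction l generalizing p0 p1 p2 p3 p4 p5 p6 p7 p8 p9 with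
  | nil => simp only [List.foldl_nil, List.filter_nil, List.append_nil]
  | cons i l ih =>
    simp only [List.foldl_cons, cvStepA]
    split_ifs with h0 h1 h2 h3 h4 h5 h6 h7 h8 h9 <;>
      (rw [ih]; simp only [List.filter_cons, cvIn, decide_eq_true_eq, Prod.mk.injEq]) <;>
      (split_ifs <;> first
        | (exfalso; omega)
        | simp only [List.append_assoc, List.cons_append, List.nil_append, and_self])

-- filtering 0..n-1 by the interval test [lo, hi) yields the contiguous range lo..min(hi,n)-1
theorem cv_filter_range (n : Nat) (lo hi : Int) (h0 : 0 ≤ lo) (_h1 : lo ≤ hi) :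
    (PySem.List.pyRange 0 (n : Int)).filter (cvIn lo hi) =
      PySem.List.pyRange lo (min hi (n : Int)) := by
  induction n with
  | zero =>
    rw [show ((0 : Nat) : Int) = 0 from rfl,
      PySem.List.pyRange_one_eq_nil (le_refl 0),
      PySem.List.pyRange_one_eq_nil (show min hi 0 ≤ lo by omega)]
    rfl
  | succ n ih =>
    rw [show ((n + 1 : Nat) : Int) = (n : Int) + 1 by push_cast; ring,
      PySem.List.pyRange_one_succ_right (by positivity), List.filter_append, ih]
    by_cases hlo : (n : Int) < lo
    · rw [PySem.List.pyRange_one_eq_nil (by omega), PySem.List.pyRange_one_eq_nil (by omega)]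
      simp [cvIn]; omega
    · by_cases hhi : (n : Int) < hi
      · have : min hi ((n : Int) + 1) = min hi (n : Int) + 1 := by omega
        rw [this, PySem.List.pyRange_one_succ_right (by omega)]
        have hmin : min hi (n : Int) = (n : Int) := by omega
        simp [cvIn, hmin]; omega
      · have : min hi ((n : Int) + 1) = min hi (n : Int) := by omega
        rw [this]
        simp [cvIn]; omega

-- ===== VERDICT (by name: the statement is the Claim_ definition above) =====
theorem cv_sorted_data_spec : Claim_equal_cv_sorted_data := by
  intro x_text _
  unfold Spec_cv_sorted_data cv_sorted_data cv_sorted_data_alt cvBounds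
  rw [cv_fold_filter,
    cv_filter_range _ 0 700 (by norm_num) (by norm_num),
    cv_filter_range _ 700 1400 (by norm_num) (by norm_num),
    cv_filter_range _ 1400 2100 (by norm_num) (by norm_num),
    cv_filter_range _ 2100 2800 (by norm_num) (by norm_num),
    cv_filter_range _ 2800 3494 (by norm_num) (by norm_num),
    cv_filter_range _ 3494 4198 (by norm_num) (by norm_num),
    cv_filter_range _ 4198 4897 (by norm_num) (by norm_num),
    cv_filter_range _ 4897 5599 (by norm_num) (by norm_num),
    cv_filter_range _ 5599 6299 (by norm_num) (by norm_num),
    cv_filter_range _ 6299 7006 (by norm_num) (by norm_num)]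
  simp [List.zip]
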